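-- pv_equiv track=rewrite | github.com/Wilhelmine21/Wilhelmine21 | Tools/Verilog/ANcodes-GUI/MyDef.py | TestforAllErrorAlter
-- ===== SOURCE A (Python) =====
-- def TestforAllErrorAlter(bitAN,module,N): #verilog未寫出error bit #效果不好
--     ANe_list=[]
--     ebit_list=[]
--     R_list=[]
--     AN=module*N
--     AN2=bin(AN)[2:]
--     AN2_0=AN2.zfill(bitAN)
--     AN2_0List=list(AN2_0)
--     for i in range(bitAN-1,-1,-1):
--         AN2_0List_e=AN2_0List.copy()
--         if AN2_0List[i] == '0':
--             AN2_0List_e[i] = '1'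
--             ANe2=''.join(AN2_0List_e)
--             ANe_num=int(ANe2,2)
--             ANe_list.append(ANe_num)
--             ebit_list.append(bitAN-i-1)
--             R_list.append(ANe_num%module)
--     for j in range(bitAN-1,-1,-1):
--         AN2_0List_e=AN2_0List.copy()
--         if AN2_0List[j] == '1':
--             AN2_0List_e[j] = '0'
--             ANe2=''.join(AN2_0List_e)
--             ANe_num=int(ANe2,2)
--             ANe_list.append(ANe_num)
--             ebit_list.append(bitAN-j-1)
--             R_list.append(ANe_num%module)
--     return ANe_list,ebit_list,R_list
-- ===== SOURCE B (Python) =====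
-- def TestforAllErrorAlter(bitAN, module, N):
--     # One arithmetic pass: flip each of the bitAN high bits of AN by +/- a power
--     # of two, bucketing flips of 0-bits and of 1-bits separately, then concatenate.
--     AN = module * N
--     L = max(bitAN, AN.bit_length(), 1)  # true width of the padded binary string
--     zv, ze, zr = [], [], []
--     ov, oe, orr = [], [], []
--     for e in range(bitAN):
--         w = 2 ** (L - bitAN + e)
--         if (AN // w) % 2 == 0:
--             v = AN + w
--             zv.append(v); ze.append(e); zr.append(v % module)
--         else:
--             v = AN - w
--             ov.append(v); oe.append(e); orr.append(v % module)
--     return zv + ov, ze + oe, zr + orr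
-- ===== Notes on version B (the rewrite author's own statement) =====
-- stated objective: alternative
-- what changed: Replaces A's two passes of copy-the-char-list / flip-a-character / join / reparse-with-int(.,2) by a single arithmetic pass that tests each bit with floor-division and flips it by adding or subtracting a power of two, collecting 0-bit flips and 1-bit flips in two separate buckets that are concatenated at the end to reproduce A's two-pass ordering. …
-- outside the precondition, e.g. on TestforAllErrorAlter(1, -1, 5): A returns ([], [], []), B returns ([-1], [0], [0]); on TestforAllErrorAlter(3, 0, 7): A raises ZeroDivisionError, B raises ZeroDivisionError; on TestforAllErrorAlter(4, -1, 5): A raises ValueError, B returns ([-1, -6, -7, -13], [2, 0, 1, 3], [0, 0, 0, 0])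
import Mathlib
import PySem

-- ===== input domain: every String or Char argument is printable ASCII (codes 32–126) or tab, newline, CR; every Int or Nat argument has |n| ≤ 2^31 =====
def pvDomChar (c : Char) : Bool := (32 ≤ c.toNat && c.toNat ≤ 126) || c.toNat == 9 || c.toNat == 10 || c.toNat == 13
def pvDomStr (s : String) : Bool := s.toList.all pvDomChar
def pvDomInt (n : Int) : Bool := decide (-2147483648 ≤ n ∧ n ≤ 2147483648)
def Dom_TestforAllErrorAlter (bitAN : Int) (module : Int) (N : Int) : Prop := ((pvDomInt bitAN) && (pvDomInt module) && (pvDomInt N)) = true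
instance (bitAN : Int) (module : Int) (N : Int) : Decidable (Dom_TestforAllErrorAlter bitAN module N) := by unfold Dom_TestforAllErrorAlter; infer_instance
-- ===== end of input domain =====

-- B replaces A's two char-list copy/flip/join/reparse passes by one arithmetic pass that
-- flips each bit by adding/subtracting a power of two into two buckets (alternative algorithm;
-- equivalence proved on Pre_: bitAN ≤ 0, or module*N nonnegative with module ≠ 0).


-- ===== PORT A =====
-- int(s, 2) hand-ported as the digit fold; exact on the nonempty all-'0'/'1' strings A
-- builds under Pre_ (no whitespace/sign/prefix/underscore ever occurs in them there).
def pvIntOfBin (cs : List Char) : Int :=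
  cs.foldl (fun acc c => acc * 2 + (if c = '1' then 1 else 0)) 0

def TestforAllErrorAlter (bitAN : Int) (module : Int) (N : Int) : List Int × List Int × List Int :=
  let AN := module * N
  let AN2 := PySem.List.slice (PySem.Int.toBinChars0b AN) (some 2) none   -- bin(AN)[2:]
  let AN2_0 := PySem.Chars.zfill AN2 bitAN
  let st1 := (PySem.List.pyRange (bitAN - 1) (-1) (-1)).foldl (fun st i =>
      if PySem.List.pyGetD AN2_0 i ' ' = '0' then
        let v := pvIntOfBin (PySem.List.pySetD AN2_0 i '1')
        (st.1 ++ [v], st.2.1 ++ [bitAN - i - 1], st.2.2 ++ [PySem.Int.mod v module])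
      else st) (([] : List Int), ([] : List Int), ([] : List Int))
  (PySem.List.pyRange (bitAN - 1) (-1) (-1)).foldl (fun st j =>
      if PySem.List.pyGetD AN2_0 j ' ' = '1' then
        let v := pvIntOfBin (PySem.List.pySetD AN2_0 j '0')
        (st.1 ++ [v], st.2.1 ++ [bitAN - j - 1], st.2.2 ++ [PySem.Int.mod v module])
      else st) st1

-- ===== PORT B =====
def TestforAllErrorAlter_alt (bitAN : Int) (module : Int) (N : Int) : List Int × List Int × List Int :=
  let AN := module * N
  let L : Int := max (max bitAN ((PySem.Int.bitLength AN : Int))) 1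
  let st := (PySem.List.pyRange 0 bitAN 1).foldl (fun st e =>
      let w : Int := 2 ^ (L - bitAN + e).toNat   -- 2 ** (L - bitAN + e); exponent ≥ 0 since L ≥ bitAN > e ≥ 0 component-wise
      if PySem.Int.mod (PySem.Int.floordiv AN w) 2 = 0 then
        ((st.1.1 ++ [AN + w], st.1.2.1 ++ [e], st.1.2.2 ++ [PySem.Int.mod (AN + w) module]), st.2)
      else
        (st.1, (st.2.1 ++ [AN - w], st.2.2.1 ++ [e], st.2.2.2 ++ [PySem.Int.mod (AN - w) module])))
    ((([] : List Int), ([] : List Int), ([] : List Int)), (([] : List Int), ([] : List Int), ([] : List Int)))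
  (st.1.1 ++ st.2.1, st.1.2.1 ++ st.2.2.1, st.1.2.2 ++ st.2.2.2)

-- ===== PRECONDITION & SPEC =====
-- Pre_ excludes (i) module = 0 with bitAN ≥ 1, where A reaches '%' and raises ZeroDivisionError,
-- and (ii) negative module*N with bitAN ≥ 1, where the 'b' left over from stripping bin()'s sign
-- makes int(.,2) raise ValueError — except at bitAN = 1, where that 'b' matches neither branch
-- and A's empty result is an accident of comparing bin()'s prefix character.
def Pre_TestforAllErrorAlter (bitAN : Int) (module : Int) (N : Int) : Prop :=
  bitAN ≤ 0 ∨ (0 ≤ module * N ∧ module ≠ 0)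
instance (bitAN : Int) (module : Int) (N : Int) : Decidable (Pre_TestforAllErrorAlter bitAN module N) := by unfold Pre_TestforAllErrorAlter; infer_instance
def pvWitness_TestforAllErrorAlter : Int × Int × Int := (4, 3, 5)

def Spec_TestforAllErrorAlter (bitAN : Int) (module : Int) (N : Int) (out : List Int × List Int × List Int) : Prop := out = TestforAllErrorAlter_alt bitAN module N
instance (bitAN : Int) (module : Int) (N : Int) (out : List Int × List Int × List Int) : Decidable (Spec_TestforAllErrorAlter bitAN module N out) := by unfold Spec_TestforAllErrorAlter; infer_instance

-- ===== CLAIM (what is proved, stated in full; the proofs are below) =====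
def Claim_equal_TestforAllErrorAlter : Prop := ∀ (bitAN : Int) (module : Int) (N : Int), Dom_TestforAllErrorAlter bitAN module N → Pre_TestforAllErrorAlter bitAN module N → Spec_TestforAllErrorAlter bitAN module N (TestforAllErrorAlter bitAN module N)

-- ===== LEMMAS AND PROOFS =====

-- Nat value of a 0/1 character list (MSB first); mirror of pvIntOfBin on the Nat side.
def pvBinValN (cs : List Char) : Nat :=
  cs.foldl (fun a c => 2 * a + (if c = '1' then 1 else 0)) 0

lemma pvBinValN_foldl (cs : List Char) (a : Nat) :
    cs.foldl (fun a c => 2 * a + (if c = '1' then 1 else 0)) a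
      = a * 2 ^ cs.length + pvBinValN cs := by
  induction cs generalizing a with
  | nil => simp [pvBinValN]
  | cons c t ih =>
    simp only [List.foldl_cons, pvBinValN, List.length_cons] at *
    rw [ih, ih (2 * 0 + if c = '1' then 1 else 0)]
    ring

lemma pvBinValN_cons (c : Char) (t : List Char) :
    pvBinValN (c :: t) = (if c = '1' then 1 else 0) * 2 ^ t.length + pvBinValN t := by
  simp only [pvBinValN, List.foldl_cons]
  rw [pvBinValN_foldl]
  simp [pvBinValN]

lemma pvBinValN_append (a b : List Char) :
    pvBinValN (a ++ b) = pvBinValN a * 2 ^ b.length + pvBinValN b := by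
  simp only [pvBinValN, List.foldl_append]
  rw [pvBinValN_foldl]
  rfl

lemma pvBinValN_lt (cs : List Char) : pvBinValN cs < 2 ^ cs.length := by
  induction cs with
  | nil => simp [pvBinValN]
  | cons c t ih =>
    rw [pvBinValN_cons]
    have : (if c = '1' then 1 else 0) ≤ 1 := by split <;> omega
    have h2 : (0:Nat) < 2 ^ t.length := Nat.two_pow_pos _
    simp only [List.length_cons, pow_succ]
    nlinarith

lemma pvBinValN_replicate_zero (k : Nat) : pvBinValN (List.replicate k '0') = 0 := by
  induction k with
  | zero => simp [pvBinValN]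
  | succ n ih => rw [List.replicate_succ, pvBinValN_cons]; simp [ih]

lemma pvIntOfBin_eq (cs : List Char) : pvIntOfBin cs = (pvBinValN cs : Int) := by
  suffices h : ∀ (a : Nat), cs.foldl (fun acc c => acc * 2 + (if c = '1' then 1 else 0)) (a : Int)
      = ((cs.foldl (fun a c => 2 * a + (if c = '1' then 1 else 0)) a : Nat) : Int) by
    simpa [pvIntOfBin, pvBinValN] using h 0
  induction cs with
  | nil => simp
  | cons c t ih =>
    intro a
    simp only [List.foldl_cons]
    have : ((a : Int) * 2 + if c = '1' then 1 else 0)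
        = ((2 * a + if c = '1' then 1 else 0 : Nat) : Int) := by
      split <;> push_cast <;> ring
    rw [this, ih]

-- binary digits of n, MSB first ('0' for 0): the value of Nat.toDigits 2 n
def pvBits (n : Nat) : List Char :=
  if _h : n < 2 then [Nat.digitChar n]
  else pvBits (n / 2) ++ [Nat.digitChar (n % 2)]
decreasing_by exact Nat.div_lt_self (by omega) (by omega)

lemma pvToDigitsCore_eq (fuel : Nat) : ∀ (n : Nat) (acc : List Char), n < fuel →
    Nat.toDigitsCore 2 fuel n acc = pvBits n ++ acc := by
  induction fuel with
  | zero => intro n acc h; omega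
  | succ f ih =>
    intro n acc h
    rw [Nat.toDigitsCore]
    by_cases h2 : n < 2
    · have h0 : n / 2 = 0 := by omega
      conv_rhs => rw [pvBits]
      simp [h0, h2]
      rw [Nat.mod_eq_of_lt h2]
    · have hne : ¬ n / 2 = 0 := by omega
      simp only [hne, if_false]
      rw [ih (n / 2) _ (by omega)]
      conv_rhs => rw [pvBits]
      simp [h2]

lemma pvToDigits_two (n : Nat) : Nat.toDigits 2 n = pvBits n := by
  unfold Nat.toDigits
  simpa using pvToDigitsCore_eq (n + 1) n [] (by omega)

lemma pvBits_mem (n : Nat) : ∀ c ∈ pvBits n, c = '0' ∨ c = '1' := by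
  induction n using Nat.strong_induction_on with
  | _ n ih =>
    intro c hc
    rw [pvBits] at hc
    split at hc
    · rename_i h2
      simp only [List.mem_singleton] at hc
      subst hc
      interval_cases n <;> decide
    · rename_i h2
      rcases List.mem_append.mp hc with h | h
      · exact ih (n / 2) (Nat.div_lt_self (by omega) (by omega)) c h
      · have : n % 2 = 0 ∨ n % 2 = 1 := by omega
        simp only [List.mem_singleton] at h
        rcases this with h0 | h0 <;> rw [h, h0] <;> simp [Nat.digitChar]

lemma pvBinValN_pvBits (n : Nat) : pvBinValN (pvBits n) = n := by
  induction n using Nat.strong_induction_on with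
  | _ n ih =>
    rw [pvBits]
    split
    · rename_i h2
      interval_cases n <;> simp [pvBinValN, Nat.digitChar]
    · rename_i h2
      rw [pvBinValN_append, ih (n / 2) (Nat.div_lt_self (by omega) (by omega))]
      have : n % 2 = 0 ∨ n % 2 = 1 := by omega
      rcases this with h0 | h0 <;> rw [h0] <;> simp [pvBinValN, Nat.digitChar] <;> omega

lemma pvBits_length (n : Nat) :
    (pvBits n).length = if n = 0 then 1 else PySem.Int.bitLength (n : Int) := by
  induction n using Nat.strong_induction_on with
  | _ n ih =>
    rw [pvBits]
    split
    · rename_i h2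
      interval_cases n
      · simp
      · simpa using (by decide : PySem.Int.bitLength (1 : Int) = 1).symm
    · rename_i h2
      rw [List.length_append, ih (n / 2) (Nat.div_lt_self (by omega) (by omega))]
      have hd : ¬ n / 2 = 0 := by omega
      have hn : ¬ n = 0 := by omega
      rw [if_neg hd, if_neg hn, PySem.Int.bitLength_natCast (by omega : 0 < n)]
      simp

lemma pvBits_ne_nil (n : Nat) : pvBits n ≠ [] := by
  rw [pvBits]; split <;> simp

-- zfill on a string that does not start with a sign character
lemma pvZfill_eq (cs : List Char) (w : Int) (hne : cs ≠ [])
    (h0 : ¬ (cs.head hne = '+' ∨ cs.head hne = '-')) :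
    PySem.Chars.zfill cs w = List.replicate (w.toNat - cs.length) '0' ++ cs := by
  unfold PySem.Chars.zfill
  cases cs with
  | nil => exact absurd rfl hne
  | cons c rest =>
    simp only [List.head_cons] at h0
    split
    · rename_i hle
      have hz : w.toNat - (c :: rest).length = 0 := by
        simp only [List.length_cons] at *
        omega
      rw [hz]
      simp
    · dsimp only
      rw [if_neg h0]

-- reading one bit of a 0/1 string by division
lemma pv_decomp (s : List Char) (i : Nat) (h : i < s.length) :
    pvBinValN s = (pvBinValN (s.take i) * 2 + (if s[i] = '1' then 1 else 0)) * 2 ^ (s.length - 1 - i)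
      + pvBinValN (s.drop (i + 1)) := by
  conv_lhs => rw [← List.take_append_drop i s, ← List.getElem_cons_drop h]
  rw [pvBinValN_append, pvBinValN_cons]
  have h1 : (s.drop (i + 1)).length = s.length - 1 - i := by
    rw [List.length_drop]; omega
  have h2 : (s[i] :: s.drop (i + 1)).length = s.length - i := by
    rw [List.length_cons, List.length_drop]; omega
  rw [h1, h2]
  have h3 : s.length - i = (s.length - 1 - i) + 1 := by omega
  rw [h3, pow_succ]
  ring

lemma pv_bit_read (s : List Char) (i : Nat) (h : i < s.length) :
    pvBinValN s / 2 ^ (s.length - 1 - i) % 2 = (if s[i] = '1' then 1 else 0) := by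
  have hd := pv_decomp s i h
  have hr : pvBinValN (s.drop (i + 1)) < 2 ^ (s.length - 1 - i) := by
    have := pvBinValN_lt (s.drop (i + 1))
    have h1 : (s.drop (i + 1)).length = s.length - 1 - i := by
      rw [List.length_drop]; omega
    rwa [h1] at this
  have hpos : (0:Nat) < 2 ^ (s.length - 1 - i) := Nat.two_pow_pos _
  rw [hd, Nat.add_comm, Nat.add_mul_div_right _ _ hpos, Nat.div_eq_of_lt hr, Nat.zero_add]
  split <;> omega

lemma pv_flip (s : List Char) (i : Nat) (c : Char) (h : i < s.length) :
    pvBinValN (s.set i c) + (if s[i] = '1' then 1 else 0) * 2 ^ (s.length - 1 - i)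
      = pvBinValN s + (if c = '1' then 1 else 0) * 2 ^ (s.length - 1 - i) := by
  rw [List.set_eq_take_cons_drop c h, pvBinValN_append, pvBinValN_cons, pv_decomp s i h]
  have h1 : (s.drop (i + 1)).length = s.length - 1 - i := by
    rw [List.length_drop]; omega
  have h2 : (c :: s.drop (i + 1)).length = (s.length - 1 - i) + 1 := by
    rw [List.length_cons, List.length_drop]; omega
  rw [h1, h2, pow_succ]
  ring

-- loop shapes: a triple of lists fed by one filtered append, and two triples (buckets)
lemma pv_foldl_triple (l : List Nat) (p : Nat → Prop) [DecidablePred p]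
    (f g h : Nat → Int) (a b c : List Int) :
    l.foldl (fun st x => if p x then (st.1 ++ [f x], st.2.1 ++ [g x], st.2.2 ++ [h x]) else st) (a, b, c)
      = (a ++ (l.filter (fun x => decide (p x))).map f,
         b ++ (l.filter (fun x => decide (p x))).map g,
         c ++ (l.filter (fun x => decide (p x))).map h) := by
  induction l generalizing a b c with
  | nil => simp
  | cons x t ih =>
    by_cases hp : p x <;> simp [hp, ih]

lemma pv_foldl_double (l : List Nat) (p : Nat → Prop) [DecidablePred p]
    (f g h f' g' h' : Nat → Int) (a b c a' b' c' : List Int) :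
    l.foldl (fun st x =>
        if p x then ((st.1.1 ++ [f x], st.1.2.1 ++ [g x], st.1.2.2 ++ [h x]), st.2)
        else (st.1, (st.2.1 ++ [f' x], st.2.2.1 ++ [g' x], st.2.2.2 ++ [h' x])))
      ((a, b, c), (a', b', c'))
      = ((a ++ (l.filter (fun x => decide (p x))).map f,
          b ++ (l.filter (fun x => decide (p x))).map g,
          c ++ (l.filter (fun x => decide (p x))).map h),
         (a' ++ (l.filter (fun x => decide (¬ p x))).map f',
          b' ++ (l.filter (fun x => decide (¬ p x))).map g',
          c' ++ (l.filter (fun x => decide (¬ p x))).map h')) := by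
  induction l generalizing a b c a' b' c' with
  | nil => simp
  | cons x t ih =>
    by_cases hp : p x <;> simp [hp, ih]

-- the main equivalence on the interesting region
lemma pv_main (bitAN module N : Int) (hb : 1 ≤ bitAN) (hAN : 0 ≤ module * N) (_hm : module ≠ 0) :
    TestforAllErrorAlter bitAN module N = TestforAllErrorAlter_alt bitAN module N := by
  obtain ⟨V, hV⟩ : ∃ V : Nat, module * N = ↑V :=
    ⟨(module * N).toNat, (Int.toNat_of_nonneg hAN).symm⟩
  obtain ⟨n, hn⟩ : ∃ n : Nat, bitAN = ↑n ∧ 1 ≤ n := ⟨bitAN.toNat, by omega, by omega⟩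
  simp only [TestforAllErrorAlter, TestforAllErrorAlter_alt]
  rw [hV]
  -- bin(AN)[2:] is the digit list pvBits V
  have hbin : PySem.List.slice (PySem.Int.toBinChars0b (V : Int)) (some 2) none = pvBits V := by
    unfold PySem.Int.toBinChars0b
    rw [if_neg (by omega : ¬ ((V:Int) < 0)), PySem.List.slice_from _ (by omega : (0:Int) ≤ 2)]
    simp [pvToDigits_two]
  rw [hbin]
  have hds := pvBits_mem V
  have hne := pvBits_ne_nil V
  have hzf : PySem.Chars.zfill (pvBits V) bitAN
      = List.replicate (bitAN.toNat - (pvBits V).length) '0' ++ pvBits V := by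
    refine pvZfill_eq _ _ hne ?_
    rcases hds _ (List.head_mem hne) with h | h <;> simp [h]
  rw [hzf]
  set s : List Char := List.replicate (bitAN.toNat - (pvBits V).length) '0' ++ pvBits V with hs
  have hlen : s.length = (bitAN.toNat - (pvBits V).length) + (pvBits V).length := by
    rw [hs, List.length_append, List.length_replicate]
  have htl := pvBits_length V
  have hval : pvBinValN s = V := by
    rw [hs, pvBinValN_append, pvBinValN_replicate_zero, pvBinValN_pvBits, Nat.zero_mul,
      Nat.zero_add]
  have h01 : ∀ c ∈ s, c = '0' ∨ c = '1' := by
    intro c hc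
    rw [hs] at hc
    rcases List.mem_append.mp hc with h | h
    · left; exact List.eq_of_mem_replicate h
    · exact hds c h
  have hL : max (max bitAN ((PySem.Int.bitLength ((V : Nat) : Int) : Nat) : Int)) 1
      = ((s.length : Nat) : Int) := by
    by_cases h0 : V = 0
    · rw [if_pos h0] at htl
      subst h0
      rw [show ((0:Nat):Int) = (0:Int) by norm_num, PySem.Int.bitLength_zero]
      omega
    · rw [if_neg h0] at htl
      have hb1 : 1 ≤ PySem.Int.bitLength ((V:Nat):Int) := by
        rw [PySem.Int.bitLength_natCast (by omega)]; omega
      omega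
  rw [hL]
  have hrA : PySem.List.pyRange (bitAN - 1) (-1) (-1)
      = (List.range n).map (fun (k : Nat) => bitAN - 1 - (k : Int)) := by
    rw [PySem.List.pyRange_neg_one, show (bitAN - 1 - -1).toNat = n by omega]
  have hrB : PySem.List.pyRange 0 bitAN 1 = (List.range n).map (fun (k : Nat) => (k : Int)) := by
    rw [PySem.List.pyRange_one, show (bitAN - 0).toNat = n by omega]
    simp
  rw [hrA, hrB, List.foldl_map, List.foldl_map, List.foldl_map]
  rw [pv_foldl_triple, pv_foldl_triple, pv_foldl_double]
  have hnn : bitAN.toNat = n := by omega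
  have hnlen : n ≤ s.length := by omega
  -- per-index facts: the char test is the arithmetic bit test, flips are ± a power of two
  have hKEY : ∀ k, k < n →
      (PySem.List.pyGetD s (bitAN - 1 - (k:Int)) ' ' = s.getD (n - 1 - k) ' ') ∧
      (PySem.Int.mod (PySem.Int.floordiv ((V:Nat):Int)
          ((2:Int) ^ (((s.length : Nat):Int) - bitAN + (k:Int)).toNat)) 2 = 0
        ↔ s.getD (n - 1 - k) ' ' = '0') ∧
      (s.getD (n - 1 - k) ' ' = '0' →
        pvIntOfBin (PySem.List.pySetD s (bitAN - 1 - (k:Int)) '1')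
          = ((V:Nat):Int) + (2:Int) ^ (((s.length : Nat):Int) - bitAN + (k:Int)).toNat) ∧
      (s.getD (n - 1 - k) ' ' = '1' →
        pvIntOfBin (PySem.List.pySetD s (bitAN - 1 - (k:Int)) '0')
          = ((V:Nat):Int) - (2:Int) ^ (((s.length : Nat):Int) - bitAN + (k:Int)).toNat) ∧
      (s.getD (n - 1 - k) ' ' = '0' ∨ s.getD (n - 1 - k) ' ' = '1') := by
    intro k hk
    have hi : bitAN - 1 - (k:Int) = ((n - 1 - k : Nat) : Int) := by omega
    have hilt : n - 1 - k < s.length := by omega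
    have hm2 : (((s.length : Nat):Int) - bitAN + (k:Int)).toNat = s.length - 1 - (n - 1 - k) := by
      omega
    have hgd : s.getD (n - 1 - k) ' ' = s[n - 1 - k]'hilt := List.getD_eq_getElem s ' ' hilt
    have hpow : ((2:Int) ^ (s.length - 1 - (n - 1 - k))) = ((2 ^ (s.length - 1 - (n - 1 - k)) : Nat) : Int) := by
      push_cast; ring
    have hpowpos : (0:Int) < (2:Int) ^ (s.length - 1 - (n - 1 - k)) := by positivity
    have hbr := pv_bit_read s (n - 1 - k) hilt
    rw [hval] at hbr
    have h01i := h01 _ (List.getElem_mem hilt)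
    refine ⟨?_, ?_, ?_, ?_, ?_⟩
    · rw [hi, PySem.List.pyGetD_natCast]
    · rw [hm2, PySem.Int.mod_eq_emod_of_pos (by omega),
        PySem.Int.floordiv_eq_ediv_of_pos hpowpos, hpow, ← Int.natCast_div]
      rw [hgd]
      constructor
      · intro h
        have hh : V / 2 ^ (s.length - 1 - (n - 1 - k)) % 2 = 0 := by omega
        rw [hbr] at hh
        rcases h01i with h0 | h0
        · exact h0
        · rw [if_pos h0] at hh; omega
      · intro h
        rw [h] at hbr
        simp at hbr
        omega
    · intro h0
      rw [hi, PySem.List.pySetD_natCast, pvIntOfBin_eq, hm2, hpow]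
      have hflip := pv_flip s (n - 1 - k) '1' hilt
      rw [hval, ← hgd, h0] at hflip
      simp at hflip
      have : pvBinValN (s.set (n - 1 - k) '1') = V + 2 ^ (s.length - 1 - (n - 1 - k)) := by omega
      rw [this]; push_cast; ring
    · intro h0
      rw [hi, PySem.List.pySetD_natCast, pvIntOfBin_eq, hm2, hpow]
      have hflip := pv_flip s (n - 1 - k) '0' hilt
      rw [hval, ← hgd, h0] at hflip
      simp at hflip
      have : pvBinValN (s.set (n - 1 - k) '0') + 2 ^ (s.length - 1 - (n - 1 - k)) = V := by omega
      omega
    · rw [hgd]; exact h01i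
  have hf0 : List.filter (fun (x : Nat) => decide (PySem.Int.mod (PySem.Int.floordiv ((V:Nat):Int)
        ((2:Int) ^ (((s.length : Nat):Int) - bitAN + (x:Int)).toNat)) 2 = 0)) (List.range n)
      = List.filter (fun (x : Nat) => decide (PySem.List.pyGetD s (bitAN - 1 - (x:Int)) ' ' = '0'))
          (List.range n) := by
    refine List.filter_congr ?_
    intro k hk
    rw [List.mem_range] at hk
    obtain ⟨hc, ht, _, _, _⟩ := hKEY k hk
    simp only [decide_eq_decide]
    rw [hc]
    exact ht
  have hf1 : List.filter (fun (x : Nat) => decide (¬ PySem.Int.mod (PySem.Int.floordiv ((V:Nat):Int)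
        ((2:Int) ^ (((s.length : Nat):Int) - bitAN + (x:Int)).toNat)) 2 = 0)) (List.range n)
      = List.filter (fun (x : Nat) => decide (PySem.List.pyGetD s (bitAN - 1 - (x:Int)) ' ' = '1'))
          (List.range n) := by
    refine List.filter_congr ?_
    intro k hk
    rw [List.mem_range] at hk
    obtain ⟨hc, ht, _, _, h2⟩ := hKEY k hk
    simp only [decide_eq_decide]
    rw [hc]
    constructor
    · intro hn0
      rcases h2 with h | h
      · exact absurd (ht.mpr h) hn0
      · exact h
    · intro h1 hB
      have hh := ht.mp hB
      rw [hh] at h1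
      exact absurd h1 (by decide)
  rw [hf0, hf1]
  have hv0 : ∀ (k : Nat), k ∈ List.filter (fun (x : Nat) => decide (PySem.List.pyGetD s (bitAN - 1 - (x:Int)) ' ' = '0'))
      (List.range n) →
      pvIntOfBin (PySem.List.pySetD s (bitAN - 1 - (k:Int)) '1')
        = ((V:Nat):Int) + (2:Int) ^ (((s.length : Nat):Int) - bitAN + (k:Int)).toNat := by
    intro k hk
    rw [List.mem_filter, List.mem_range, decide_eq_true_eq] at hk
    obtain ⟨hc, _, hv, _, _⟩ := hKEY k hk.1
    exact hv (hc.symm.trans hk.2)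
  have hv1 : ∀ (k : Nat), k ∈ List.filter (fun (x : Nat) => decide (PySem.List.pyGetD s (bitAN - 1 - (x:Int)) ' ' = '1'))
      (List.range n) →
      pvIntOfBin (PySem.List.pySetD s (bitAN - 1 - (k:Int)) '0')
        = ((V:Nat):Int) - (2:Int) ^ (((s.length : Nat):Int) - bitAN + (k:Int)).toNat := by
    intro k hk
    rw [List.mem_filter, List.mem_range, decide_eq_true_eq] at hk
    obtain ⟨hc, _, _, hv, _⟩ := hKEY k hk.1
    exact hv (hc.symm.trans hk.2)
  simp only [List.nil_append]
  refine congrArg₂ Prod.mk ?_ (congrArg₂ Prod.mk ?_ ?_)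
  · exact congrArg₂ (· ++ ·) (List.map_congr_left hv0) (List.map_congr_left hv1)
  · refine congrArg₂ (· ++ ·) (List.map_congr_left ?_) (List.map_congr_left ?_) <;>
      (intro a _; omega)
  · refine congrArg₂ (· ++ ·) (List.map_congr_left ?_) (List.map_congr_left ?_)
    · intro a ha; rw [hv0 a ha]
    · intro a ha; rw [hv1 a ha]

-- ===== VERDICT (by name: the statement is the Claim_ definition above) =====
theorem TestforAllErrorAlter_spec : Claim_equal_TestforAllErrorAlter := by
  intro bitAN module N _ hpre
  unfold Spec_TestforAllErrorAlter
  by_cases hb : bitAN ≤ 0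
  · unfold TestforAllErrorAlter TestforAllErrorAlter_alt
    rw [PySem.List.pyRange_neg_one_eq_nil (by omega), PySem.List.pyRange_one_eq_nil (by omega)]
    rfl
  · rcases hpre with h | ⟨h1, h2⟩
    · omega
    · exact pv_main bitAN module N (by omega) h1 h2
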